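-- pv_equiv track=rewrite | github.com/amlanacharya/Agent | module5/exercises/lesson4_exercises.py | _select_strategy
-- ===== SOURCE A (Python) =====
-- def _select_strategy(query: str) -> str:
--     """Select retrieval strategy based on query characteristics.
--
--     Args:
--         query: User query
--
--     Returns:
--         Selected strategy
--     """
--     query_lower = query.lower()
--
--     if "explain" in query_lower or "what is" in query_lower:
--         return "compression"  # For explanatory queries
--     elif any(term in query_lower for term in ["find", "search", "locate"]):
--         return "semantic"  # For search queries
--     elif any(term in query_lower for term in ["compare", "difference", "versus"]):
--         return "ensemble"  # For comparative queries
--     elif any(term in query_lower for term in ["diverse", "variety", "different"]):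
--         return "mmr"  # For queries seeking diversity
--     elif any(term in query_lower for term in ["filter", "by author", "from source", "date"]):
--         return "self_query"  # For queries with metadata filters
--     else:
--         return "semantic"  # Default to semantic search
-- ===== SOURCE B (Python) =====
-- # Flat keyword->priority map + min-aggregation: instead of an ordered if/elif
-- # chain, score every matched keyword by its rule priority and take the minimum.
-- PRIORITY = {
--     "explain": 0, "what is": 0,
--     "find": 1, "search": 1, "locate": 1,
--     "compare": 2, "difference": 2, "versus": 2,
--     "diverse": 3, "variety": 3, "different": 3,
--     "filter": 4, "by author": 4, "from source": 4, "date": 4,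
-- }
-- STRATEGIES = ("compression", "semantic", "ensemble", "mmr", "self_query")
--
--
-- def _select_strategy(query: str) -> str:
--     q = query.lower()
--     return STRATEGIES[min((p for kw, p in PRIORITY.items() if kw in q), default=1)]
-- ===== Notes on version B (the rewrite author's own statement) =====
-- stated objective: alternative
-- what changed: Replaces the ordered if/elif chain by a flat keyword-to-priority map with min-aggregation: every matched keyword contributes its rule's priority, the minimum priority indexes a strategy tuple (default 1 = semantic), so no ordered rule scan or early return remains.
import Mathlib
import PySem

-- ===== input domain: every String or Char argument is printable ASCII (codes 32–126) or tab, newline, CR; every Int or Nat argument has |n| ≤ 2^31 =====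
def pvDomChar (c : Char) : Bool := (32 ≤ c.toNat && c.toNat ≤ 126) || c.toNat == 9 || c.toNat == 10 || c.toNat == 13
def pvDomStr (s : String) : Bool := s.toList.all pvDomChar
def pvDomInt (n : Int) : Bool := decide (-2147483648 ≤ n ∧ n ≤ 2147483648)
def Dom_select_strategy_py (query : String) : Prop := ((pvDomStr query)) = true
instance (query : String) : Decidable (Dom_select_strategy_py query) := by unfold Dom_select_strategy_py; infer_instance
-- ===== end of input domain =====

-- B replaces the if/elif chain by a flat keyword->priority map with min-aggregation
-- over all matched keywords (alternative decomposition, same cost).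


-- ===== PORT A =====
def select_strategy_py (query : String) : String :=
  let query_lower := PySem.Str.lower query
  if PySem.Str.isIn "explain" query_lower || PySem.Str.isIn "what is" query_lower then
    "compression"
  else if ["find", "search", "locate"].any (fun term => PySem.Str.isIn term query_lower) then
    "semantic"
  else if ["compare", "difference", "versus"].any (fun term => PySem.Str.isIn term query_lower) then
    "ensemble"
  else if ["diverse", "variety", "different"].any (fun term => PySem.Str.isIn term query_lower) then
    "mmr"
  else if ["filter", "by author", "from source", "date"].any (fun term => PySem.Str.isIn term query_lower) then
    "self_query"
  else
    "semantic"

-- ===== PORT B =====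
-- flat keyword -> priority map (PRIORITY in Source B)
def pvPriority : List (String × Nat) :=
  [("explain", 0), ("what is", 0),
   ("find", 1), ("search", 1), ("locate", 1),
   ("compare", 2), ("difference", 2), ("versus", 2),
   ("diverse", 3), ("variety", 3), ("different", 3),
   ("filter", 4), ("by author", 4), ("from source", 4), ("date", 4)]

-- strategy tuple indexed by priority (STRATEGIES in Source B)
def pvStrategies : List String :=
  ["compression", "semantic", "ensemble", "mmr", "self_query"]

-- running minimum for Python's min(...) over the generator (none = no match yet)
def pvMin (acc : Option Nat) (p : Nat) : Nat :=
  match acc with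
  | none => p
  | some m => min m p

-- min of the priorities of all matched keywords (Python's min(gen, default=1)),
-- then index into the strategy table
def select_strategy_py_alt (query : String) : String :=
  let q := PySem.Str.lower query
  let best :=
    (pvPriority.foldl
      (fun acc kp => if PySem.Str.isIn kp.1 q then some (pvMin acc kp.2) else acc)
      none).getD 1
  pvStrategies.getD best ""

-- ===== PRECONDITION & SPEC =====
def Spec_select_strategy_py (query : String) (out : String) : Prop := out = select_strategy_py_alt query
instance (query : String) (out : String) : Decidable (Spec_select_strategy_py query out) := by unfold Spec_select_strategy_py; infer_instance

-- ===== CLAIM (what is proved, stated in full; the proofs are below) =====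
def Claim_equal_select_strategy_py : Prop := ∀ (query : String), Dom_select_strategy_py query → Spec_select_strategy_py query (select_strategy_py query)

-- ===== LEMMAS AND PROOFS =====

-- folding one keyword group (all priorities equal to p): a match drives the
-- accumulator to some (pvMin acc p), further matches leave it unchanged
theorem pv_foldl_group (q : String) (p : Nat) (ks : List String) (acc : Option Nat) :
    (ks.map (fun k => (k, p))).foldl
      (fun acc kp => if PySem.Str.isIn kp.1 q then some (pvMin acc kp.2) else acc) acc
    = if ks.any (fun k => PySem.Str.isIn k q) then some (pvMin acc p) else acc := by
  induction ks generalizing acc with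
  | nil => simp
  | cons k ks ih =>
    simp only [List.map_cons, List.foldl_cons, List.any_cons]
    by_cases h : PySem.Str.isIn k q = true
    · simp only [h, if_true, Bool.true_or, ih]
      have hmin : pvMin (some (pvMin acc p)) p = pvMin acc p := by
        cases acc <;> simp [pvMin]
      rw [hmin]
      split <;> rfl
    · simp only [h, Bool.false_eq_true, if_false, ih, Bool.false_or]

-- ===== VERDICT (by name: the statement is the Claim_ definition above) =====
theorem select_strategy_py_spec : Claim_equal_select_strategy_py := by
  intro query _
  unfold Spec_select_strategy_py select_strategy_py select_strategy_py_alt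
  have hsplit : pvPriority =
      (["explain", "what is"].map (fun k => (k, 0)))
      ++ ((["find", "search", "locate"].map (fun k => (k, 1)))
      ++ ((["compare", "difference", "versus"].map (fun k => (k, 2)))
      ++ ((["diverse", "variety", "different"].map (fun k => (k, 3)))
      ++ (["filter", "by author", "from source", "date"].map (fun k => (k, 4)))))) := rfl
  rw [hsplit]
  simp only [List.foldl_append, pv_foldl_group]
  simp only [List.any_cons, List.any_nil, Bool.or_false]
  generalize PySem.Str.isIn "explain" (PySem.Str.lower query) = b1
  generalize PySem.Str.isIn "what is" (PySem.Str.lower query) = b2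
  generalize (PySem.Str.isIn "find" (PySem.Str.lower query)
      || (PySem.Str.isIn "search" (PySem.Str.lower query)
      || PySem.Str.isIn "locate" (PySem.Str.lower query))) = g1
  generalize (PySem.Str.isIn "compare" (PySem.Str.lower query)
      || (PySem.Str.isIn "difference" (PySem.Str.lower query)
      || PySem.Str.isIn "versus" (PySem.Str.lower query))) = g2
  generalize (PySem.Str.isIn "diverse" (PySem.Str.lower query)
      || (PySem.Str.isIn "variety" (PySem.Str.lower query)
      || PySem.Str.isIn "different" (PySem.Str.lower query))) = g3
  generalize (PySem.Str.isIn "filter" (PySem.Str.lower query)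
      || (PySem.Str.isIn "by author" (PySem.Str.lower query)
      || (PySem.Str.isIn "from source" (PySem.Str.lower query)
      || PySem.Str.isIn "date" (PySem.Str.lower query)))) = g4
  revert b1 b2 g1 g2 g3 g4
  decide
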